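-- pv_equiv track=rewrite | github.com/issraaatwi/med | statistics.py | calculate_gender_statistics
-- ===== SOURCE A (Python) =====
-- def calculate_gender_statistics(patients):
--     gender_statistics = {
--         "Male": 0,
--         "Female": 0,
--         "Other": 0
--     }
--
--     for patient in patients:
--         if patient["gender"] == "Male":
--             gender_statistics["Male"] += 1
--         elif patient["gender"] == "Female":
--             gender_statistics["Female"] += 1
--         else:
--             gender_statistics["Other"] += 1
--
--     return gender_statistics
-- ===== SOURCE B (Python) =====
-- def calculate_gender_statistics(patients):
--     genders = [patient["gender"] for patient in patients]
--     male = genders.count("Male")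
--     female = genders.count("Female")
--     return {
--         "Male": male,
--         "Female": female,
--         "Other": len(genders) - male - female,
--     }
-- ===== Notes on version B (the rewrite author's own statement) =====
-- stated objective: simpler
-- what changed: B extracts the gender list once, counts 'Male' and 'Female' with list.count, and derives 'Other' by subtraction, eliminating A's three-way branch and mutable tally.
import Mathlib
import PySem

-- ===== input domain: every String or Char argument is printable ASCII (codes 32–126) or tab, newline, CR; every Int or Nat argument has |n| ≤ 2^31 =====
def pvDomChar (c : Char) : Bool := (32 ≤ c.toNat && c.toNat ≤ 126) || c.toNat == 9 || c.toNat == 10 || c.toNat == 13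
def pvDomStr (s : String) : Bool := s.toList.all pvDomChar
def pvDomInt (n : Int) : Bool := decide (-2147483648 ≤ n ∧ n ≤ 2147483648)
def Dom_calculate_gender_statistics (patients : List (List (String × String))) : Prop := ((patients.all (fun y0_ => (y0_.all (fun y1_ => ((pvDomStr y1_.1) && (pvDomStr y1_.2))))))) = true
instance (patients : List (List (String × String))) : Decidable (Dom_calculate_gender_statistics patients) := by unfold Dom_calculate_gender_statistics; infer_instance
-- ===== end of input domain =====

-- B is a single-pass count over the extracted gender list with 'Other' derived by subtraction.
-- ===== PORT A =====
-- patient["gender"] raises KeyError when absent; Pre_ excludes that, so getD "" is never hit inside Pre_.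
def gsStep (d : PySem.Dict String Int) (patient : List (String × String)) : PySem.Dict String Int :=
  let g := ((PySem.Dict.mk patient).get? "gender").getD ""
  if g = "Male" then d.modify "Male" 0 (· + 1)
  else if g = "Female" then d.modify "Female" 0 (· + 1)
  else d.modify "Other" 0 (· + 1)

def calculate_gender_statistics (patients : List (List (String × String))) : List (String × Int) :=
  let init : PySem.Dict String Int :=
    ((PySem.Dict.empty.insert "Male" 0).insert "Female" 0).insert "Other" 0
  (patients.foldl gsStep init).items

-- ===== PORT B =====
def calculate_gender_statistics_alt (patients : List (List (String × String))) : List (String × Int) :=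
  let genders := patients.map (fun patient => ((PySem.Dict.mk patient).get? "gender").getD "")
  let male : Int := genders.count "Male"
  let female : Int := genders.count "Female"
  [("Male", male), ("Female", female), ("Other", (genders.length : Int) - male - female)]

-- ===== PRECONDITION & SPEC =====
-- Pre_ excludes patients missing the "gender" key, on which A raises KeyError.
def Pre_calculate_gender_statistics (patients : List (List (String × String))) : Prop :=
  ∀ p ∈ patients, p.any (fun kv => kv.1 == "gender") = true
instance (patients : List (List (String × String))) : Decidable (Pre_calculate_gender_statistics patients) := by unfold Pre_calculate_gender_statistics; infer_instance

def pvWitness_calculate_gender_statistics : (List (List (String × String))) :=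
  [[("gender", "Male")], [("gender", "Female"), ("name", "x")], [("gender", "unknown")]]

def Spec_calculate_gender_statistics (patients : List (List (String × String))) (out : List (String × Int)) : Prop := out = calculate_gender_statistics_alt patients
instance (patients : List (List (String × String))) (out : List (String × Int)) : Decidable (Spec_calculate_gender_statistics patients out) := by unfold Spec_calculate_gender_statistics; infer_instance

-- ===== CLAIM (what is proved, stated in full; the proofs are below) =====
def Claim_equal_calculate_gender_statistics : Prop := ∀ (patients : List (List (String × String))), Dom_calculate_gender_statistics patients → Pre_calculate_gender_statistics patients → Spec_calculate_gender_statistics patients (calculate_gender_statistics patients)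

-- ===== LEMMAS AND PROOFS =====

lemma gsStep_mk (p : List (String × String)) (m f o : Int) :
    gsStep (PySem.Dict.mk [("Male", m), ("Female", f), ("Other", o)]) p
    = (let g := ((PySem.Dict.mk p).get? "gender").getD ""
       if g = "Male" then PySem.Dict.mk [("Male", m + 1), ("Female", f), ("Other", o)]
       else if g = "Female" then PySem.Dict.mk [("Male", m), ("Female", f + 1), ("Other", o)]
       else PySem.Dict.mk [("Male", m), ("Female", f), ("Other", o + 1)]) := by
  simp only [gsStep]
  split_ifs <;>
    (apply PySem.Dict.ext;
     simp [PySem.Dict.modify, PySem.Dict.getD, PySem.Dict.get?_mk_cons, PySem.Dict.items_insert])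

-- loop invariant for A's fold over the literal three-key dict
lemma gs_loop (ps : List (List (String × String))) (m f o : Int) :
    (ps.foldl gsStep (PySem.Dict.mk [("Male", m), ("Female", f), ("Other", o)])).items
    = [("Male", m + ((ps.map (fun p => ((PySem.Dict.mk p).get? "gender").getD "")).count "Male" : Int)),
       ("Female", f + ((ps.map (fun p => ((PySem.Dict.mk p).get? "gender").getD "")).count "Female" : Int)),
       ("Other", o + ((ps.map (fun p => ((PySem.Dict.mk p).get? "gender").getD "")).countP
                        (fun g => ¬(g = "Male") ∧ ¬(g = "Female")) : Int))] := by
  induction ps generalizing m f o with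
  | nil => simp
  | cons p ps ih =>
    rw [List.foldl_cons, gsStep_mk]
    simp only [List.map_cons]
    split_ifs with h1 h2
    · rw [ih]; simp [h1]; ring_nf
    · rw [ih]; simp [h2]; ring_nf
    · rw [ih]; simp [h1, h2]; ring_nf

-- 'Other' equals the remainder: length minus the Male and Female counts
lemma other_eq_sub (gs : List String) :
    (gs.countP (fun g => ¬(g = "Male") ∧ ¬(g = "Female")) : Int)
    = (gs.length : Int) - gs.count "Male" - gs.count "Female" := by
  induction gs with
  | nil => simp
  | cons g gs ih =>
    simp only [List.countP_cons, List.count_cons, List.length_cons]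
    by_cases h1 : g = "Male" <;> by_cases h2 : g = "Female" <;> simp_all <;> omega

-- ===== VERDICT (by name: the statement is the Claim_ definition above) =====
theorem calculate_gender_statistics_spec : Claim_equal_calculate_gender_statistics := by
  intro patients _ _
  show _ = _
  unfold calculate_gender_statistics calculate_gender_statistics_alt
  have hinit : ((PySem.Dict.empty.insert "Male" (0:Int)).insert "Female" 0).insert "Other" 0
      = PySem.Dict.mk [("Male", 0), ("Female", 0), ("Other", 0)] := by decide
  simp only [hinit, gs_loop]
  have h := other_eq_sub (patients.map (fun p => ((PySem.Dict.mk p).get? "gender").getD ""))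
  simp at h ⊢
  simp [h]
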